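-- pv_equiv track=rewrite | github.com/suraj1ly/AI-Vs-2048 | Project/Experiments/minimax_with_monotonicity_with_alphabeta.py | monotonocity_hueristics
-- ===== SOURCE A (Python) =====
-- def is_monotonoc(L):
--     return all(x >= y for x, y in zip(L, L[1:])) or all(x <= y for x, y in zip(L, L[1:]))
--
-- def monotonocity_hueristics(b):
--     count = 0
--     for i in b:
--         if not is_monotonoc(i):
--             count =count+1
--
--     t_matrix = zip(*b)
--
--     for i in t_matrix:
--         if not is_monotonoc(i):
--             count =count+1
--
--     return (-1)*count*16
-- ===== SOURCE B (Python) =====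
-- def monotonocity_hueristics(b):
--     lines = list(b) + [list(c) for c in zip(*b)]
--     bad = sum(1 for L in lines
--               if not (list(L) == sorted(L) or list(L) == sorted(L, reverse=True)))
--     return -16 * bad
-- ===== Notes on version B (the rewrite author's own statement) =====
-- stated objective: idiomatic
-- what changed: B collects rows and transposed columns into one line list and decides monotonicity by comparing each line with its sorted ascending/descending copies (list(L)==sorted(L) or ==sorted(L,reverse=True)), counting failures once with a single sum, instead of A's two counting loops each running an adjacent-pair scan predicate.
import Mathlib
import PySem

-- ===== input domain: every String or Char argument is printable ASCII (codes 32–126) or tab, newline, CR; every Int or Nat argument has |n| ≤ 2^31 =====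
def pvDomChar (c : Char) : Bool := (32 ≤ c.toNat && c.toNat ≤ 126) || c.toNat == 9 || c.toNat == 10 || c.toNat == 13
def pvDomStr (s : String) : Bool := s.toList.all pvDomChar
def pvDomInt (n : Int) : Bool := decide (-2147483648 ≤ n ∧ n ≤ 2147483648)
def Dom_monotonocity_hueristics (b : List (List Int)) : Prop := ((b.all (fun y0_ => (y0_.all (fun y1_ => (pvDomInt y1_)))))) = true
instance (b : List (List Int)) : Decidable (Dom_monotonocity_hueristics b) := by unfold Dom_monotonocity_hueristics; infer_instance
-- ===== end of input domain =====

-- B replaces A's two adjacent-pair-scan counting loops by one count over rows ++ columns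
-- using the idiomatic sorted-comparison test for monotonicity; return value only, no mutation.

-- zip(*b): Python's zip over the unpacked rows — exact: yields min-row-length tuples, empty for b = []
-- (the getD default 0 is never reached: every index is below every row's length).
def pyZipStar (b : List (List Int)) : List (List Int) :=
  match b with
  | [] => []
  | r :: rs =>
      (List.range ((rs.map List.length).foldl min r.length)).map
        (fun i => (r :: rs).map (fun row => row.getD i 0))

-- ===== PORT A =====
-- L[1:] is L.drop 1 (exact for this nonnegative slice).
def is_monotonoc (L : List Int) : Bool :=
  ((L.zip (L.drop 1)).all (fun p => decide (p.2 ≤ p.1)))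
    || ((L.zip (L.drop 1)).all (fun p => decide (p.1 ≤ p.2)))

def monotonocity_hueristics (b : List (List Int)) : Int :=
  let count : Int := b.foldl (fun c i => if !is_monotonoc i then c + 1 else c) 0
  let t_matrix := pyZipStar b
  let count : Int := t_matrix.foldl (fun c i => if !is_monotonoc i then c + 1 else c) count
  (-1) * count * 16

-- ===== PORT B =====
def sortTestMono (L : List Int) : Bool :=
  decide (L = PySem.List.sorted L (fun x => x))
    || decide (L = PySem.List.sorted L (fun x => x) true)

def monotonocity_hueristics_alt (b : List (List Int)) : Int :=
  let lines := b ++ pyZipStar b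
  (-16) * ((lines.countP (fun L => !sortTestMono L) : Nat) : Int)

-- ===== PRECONDITION & SPEC =====
def Spec_monotonocity_hueristics (b : List (List Int)) (out : Int) : Prop := out = monotonocity_hueristics_alt b
instance (b : List (List Int)) (out : Int) : Decidable (Spec_monotonocity_hueristics b out) := by unfold Spec_monotonocity_hueristics; infer_instance

-- ===== CLAIM (what is proved, stated in full; the proofs are below) =====
def Claim_equal_monotonocity_hueristics : Prop := ∀ (b : List (List Int)), Dom_monotonocity_hueristics b → Spec_monotonocity_hueristics b (monotonocity_hueristics b)

-- ===== LEMMAS AND PROOFS =====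

-- the adjacent-pair all-scan is the chain condition
theorem allZip_eq_isChain (r : Int → Int → Bool) (L : List Int) :
    ((L.zip (L.drop 1)).all (fun p => r p.1 p.2) = true) ↔ L.IsChain (fun a b => r a b = true) := by
  induction L with
  | nil => simp
  | cons x t ih =>
    cases t with
    | nil => simp
    | cons y t2 =>
      simp only [List.drop_succ_cons, List.drop_zero, List.zip_cons_cons, List.all_cons,
        Bool.and_eq_true, List.isChain_cons_cons] at *
      exact and_congr Iff.rfl ih

theorem scan_up_iff (L : List Int) :
    ((L.zip (L.drop 1)).all (fun p => decide (p.1 ≤ p.2)) = true)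
      ↔ L = PySem.List.sorted L (fun x => x) := by
  refine (allZip_eq_isChain (fun a b => decide (a ≤ b)) L).trans ?_
  simp only [decide_eq_true_eq]
  rw [List.isChain_iff_pairwise]
  constructor
  · intro h; exact (PySem.List.sorted_eq_self_of_pairwise L (fun x => x) h).symm
  · intro h; rw [h]; exact PySem.List.sorted_pairwise L (fun x => x)

theorem scan_down_iff (L : List Int) :
    ((L.zip (L.drop 1)).all (fun p => decide (p.2 ≤ p.1)) = true)
      ↔ L = PySem.List.sorted L (fun x => x) true := by
  refine (allZip_eq_isChain (fun a b => decide (b ≤ a)) L).trans ?_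
  simp only [decide_eq_true_eq]
  haveI : Trans (fun a b : Int => b ≤ a) (fun a b : Int => b ≤ a) (fun a b : Int => b ≤ a) :=
    ⟨fun h1 h2 => le_trans h2 h1⟩
  rw [List.isChain_iff_pairwise]
  constructor
  · intro h; exact (PySem.List.sorted_rev_eq_self_of_pairwise L (fun x => x) h).symm
  · intro h; rw [h]; exact PySem.List.sorted_pairwise_rev L (fun x => x)

theorem mono_eq_sortTest (L : List Int) : is_monotonoc L = sortTestMono L := by
  unfold is_monotonoc sortTestMono
  rw [Bool.eq_iff_iff]
  simp only [Bool.or_eq_true, decide_eq_true_eq]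
  rw [scan_down_iff, scan_up_iff]
  exact or_comm

-- ===== VERDICT (by name: the statement is the Claim_ definition above) =====
theorem monotonocity_hueristics_spec : Claim_equal_monotonocity_hueristics := by
  intro b _
  unfold Spec_monotonocity_hueristics monotonocity_hueristics monotonocity_hueristics_alt
  simp only
  rw [← List.foldl_append,
      PySem.List.foldl_count_if (fun x => !is_monotonoc x) (b ++ pyZipStar b) 0]
  have hc : List.countP (fun x => !is_monotonoc x) (b ++ pyZipStar b)
      = List.countP (fun L => !sortTestMono L) (b ++ pyZipStar b) := by
    apply List.countP_congr
    intro x _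
    rw [mono_eq_sortTest]
  rw [hc]
  ring
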